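-- pv_equiv track=rewrite | github.com/hwmaltby/project-euler | problems/problem_115.py | counting_block_combinations
-- ===== SOURCE A (Python) =====
-- def counting_block_combinations(n, m):
--     """
--     Returns the number of possible block combinations of length n with
--     minimal red block length m.
--     """
--     num_ways = [1] * (n + 1)
--     for i in range(1, min(m, n + 1)):
--         num_ways[i] = 0
--     for i in range(1, n + 1):
--         num_ways[i] += num_ways[i - 1]
--         for j in range(m + 1, i + 1):
--             num_ways[i] += num_ways[i - j]
--     return num_ways
-- ===== SOURCE B (Python) =====
-- def counting_block_combinations(n, m):
--     """
--     Returns the number of possible block combinations of length n with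
--     minimal red block length m.
--     One pass with a running prefix sum replacing A's inner window-sum loop.
--     """
--     if n < 0:
--         return []
--     f = [1]
--     s = 0  # running sum of f[0..i-m-1]
--     for i in range(1, n + 1):
--         if i - m - 1 >= 0:
--             s += f[i - m - 1]
--         f.append((1 if i >= m else 0) + f[i - 1] + s)
--     return f
-- ===== Notes on version B (the rewrite author's own statement) =====
-- stated objective: faster
-- what changed: B replaces A's inner loop (which re-sums the window num_ways[0..i-m-1] for every i) by a single running prefix sum carried across the one pass that appends each entry, turning the O(n^2) double loop into O(n).
-- outside the precondition, e.g. on counting_block_combinations(2, -1): A returns [1, 5, 18], B raises IndexError; on counting_block_combinations(3, -2): A raises IndexError, B raises IndexError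
import Mathlib
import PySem

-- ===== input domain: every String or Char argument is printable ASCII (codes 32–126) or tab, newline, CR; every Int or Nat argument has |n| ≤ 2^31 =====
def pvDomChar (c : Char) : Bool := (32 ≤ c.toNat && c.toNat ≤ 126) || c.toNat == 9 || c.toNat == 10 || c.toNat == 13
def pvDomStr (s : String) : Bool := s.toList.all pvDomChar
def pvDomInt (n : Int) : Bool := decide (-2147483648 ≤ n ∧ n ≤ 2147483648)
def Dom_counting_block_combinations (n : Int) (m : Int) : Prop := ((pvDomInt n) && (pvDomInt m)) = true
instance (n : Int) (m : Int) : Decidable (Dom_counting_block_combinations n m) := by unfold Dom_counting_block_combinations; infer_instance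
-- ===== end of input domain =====

-- B replaces A's quadratic inner window-sum loop by a single pass with a running prefix sum.

-- ===== PORT A =====
-- Literal port of A: a list of 1s, zero the slots 1..min(m,n+1)-1, then the double loop;
-- Python's raising index reads/writes are pyGetD/pySetD (all in range on every input in Pre_).
def counting_block_combinations (n : Int) (m : Int) : List Int :=
  let w0 : List Int := List.replicate (n + 1).toNat 1
  let w1 := (PySem.List.pyRange 1 (min m (n + 1)) 1).foldl
      (fun w i => PySem.List.pySetD w i 0) w0
  (PySem.List.pyRange 1 (n + 1) 1).foldl (fun w i =>
    let w2 := PySem.List.pySetD w i (PySem.List.pyGetD w i 0 + PySem.List.pyGetD w (i - 1) 0)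
    (PySem.List.pyRange (m + 1) (i + 1) 1).foldl
      (fun w j => PySem.List.pySetD w i (PySem.List.pyGetD w i 0 + PySem.List.pyGetD w (i - j) 0)) w2) w1

-- ===== PORT B =====
-- Literal port of B: one pass, state = (row built so far, running prefix sum s).
def counting_block_combinations_alt (n : Int) (m : Int) : List Int :=
  if n < 0 then []
  else
    ((PySem.List.pyRange 1 (n + 1) 1).foldl (fun (fs : List Int × Int) i =>
        let s := if 0 ≤ i - m - 1 then fs.2 + PySem.List.pyGetD fs.1 (i - m - 1) 0 else fs.2
        (fs.1 ++ [(if m ≤ i then 1 else 0) + PySem.List.pyGetD fs.1 (i - 1) 0 + s], s))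
      (([1] : List Int), (0 : Int))).1

-- ===== PRECONDITION & SPEC =====
-- Pre_ keeps m in the function's natural domain (a minimal red block length, m ≥ 0) whenever n ≥ 1:
-- for m ≤ -2 and n ≥ 1 A raises IndexError, and for m = -1 and n ≥ 1 A's value comes from reading
-- num_ways[i] in mid-update (the j = 0 step), where B's own indexing itself raises IndexError.
def Pre_counting_block_combinations (n : Int) (m : Int) : Prop := 0 ≤ m ∨ n ≤ 0
instance (n : Int) (m : Int) : Decidable (Pre_counting_block_combinations n m) := by
  unfold Pre_counting_block_combinations; infer_instance

def pvWitness_counting_block_combinations : Int × Int := (10, 3)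

def Spec_counting_block_combinations (n : Int) (m : Int) (out : List Int) : Prop :=
  out = counting_block_combinations_alt n m
instance (n : Int) (m : Int) (out : List Int) : Decidable (Spec_counting_block_combinations n m out) := by
  unfold Spec_counting_block_combinations; infer_instance

-- ===== CLAIM (what is proved, stated in full; the proofs are below) =====
def Claim_equal_counting_block_combinations : Prop :=
  ∀ (n : Int) (m : Int), Dom_counting_block_combinations n m →
    Pre_counting_block_combinations n m →
    Spec_counting_block_combinations n m (counting_block_combinations n m)

-- ===== LEMMAS AND PROOFS =====

def pvStepRows (m : Nat) : Nat → List Int × Int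
  | 0 => ([1], 0)
  | k + 1 =>
    let p := pvStepRows m k
    let s := if m ≤ k then p.2 + p.1.getD (k - m) 0 else p.2
    (p.1 ++ [(if m ≤ k + 1 then 1 else 0) + p.1.getD k 0 + s], s)

lemma pvStepRows_len (m k : Nat) : (pvStepRows m k).1.length = k + 1 := by
  induction k with
  | zero => rfl
  | succ k ih => simp [pvStepRows, ih]

lemma pvStepRows_snd (m k : Nat) :
    (pvStepRows m k).2 = ((pvStepRows m k).1.take (k - m)).sum := by
  induction k with
  | zero => simp [pvStepRows]
  | succ k ih =>
    have hl := pvStepRows_len m k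
    by_cases h : m ≤ k
    · have h1 : k + 1 - m = (k - m) + 1 := by omega
      have h2 : k - m < (pvStepRows m k).1.length := by omega
      simp only [pvStepRows, h, if_true, h1]
      rw [List.take_append_of_le_length (by omega), List.sum_take_succ _ _ h2]
      simp [ih, List.getD, List.getElem?_eq_getElem h2]
    · have h1 : k + 1 - m = 0 := by omega
      have h2 : k - m = 0 := by omega
      simp [pvStepRows, h, h1, ih, h2]

lemma pvB_fold (M N : Nat) :
    ((PySem.List.pyRange 1 ((N : Int) + 1) 1).foldl (fun (fs : List Int × Int) i =>
        let s := if 0 ≤ i - (M : Int) - 1 then fs.2 + PySem.List.pyGetD fs.1 (i - (M : Int) - 1) 0 else fs.2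
        (fs.1 ++ [(if (M : Int) ≤ i then 1 else 0) + PySem.List.pyGetD fs.1 (i - 1) 0 + s], s))
      (([1] : List Int), (0 : Int))) = pvStepRows M N := by
  induction N with
  | zero =>
    rw [PySem.List.pyRange_one_eq_nil (by omega)]
    rfl
  | succ N ih =>
    have hb : ((N : Int) + 1) + 1 = ((N + 1 : Nat) : Int) + 1 := by push_cast; ring
    have : ((N + 1 : Nat) : Int) + 1 = ((N : Int) + 1) + 1 := by push_cast; ring
    rw [this, PySem.List.pyRange_one_succ_right (by omega), List.foldl_concat, ih]
    have hcond : (0 ≤ (N : Int) + 1 - (M : Int) - 1) = (M ≤ N) := by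
      simp [le_iff_lt_or_eq]; omega
    by_cases h : M ≤ N
    · have e1 : (N : Int) + 1 - (M : Int) - 1 = ((N - M : Nat) : Int) := by omega
      have e2 : (N : Int) + 1 - 1 = ((N : Nat) : Int) := by omega
      simp only [e1, e2, PySem.List.pyGetD_natCast]
      have : ((M : Int) ≤ (N : Int) + 1) = True := by simp; omega
      simp only [pvStepRows, this, if_true, if_pos h]
      simp [Nat.le_succ_of_le h]
    · have e2 : (N : Int) + 1 - 1 = ((N : Nat) : Int) := by omega
      simp only [e2, PySem.List.pyGetD_natCast]
      rw [if_neg (by omega : ¬ (0:Int) ≤ (N:Int) + 1 - (M:Int) - 1)]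
      simp only [pvStepRows, if_neg h]
      by_cases h2 : M ≤ N + 1
      · rw [if_pos (by omega : (M:Int) ≤ (N:Int)+1), if_pos h2]
      · rw [if_neg (by omega : ¬ (M:Int) ≤ (N:Int)+1), if_neg h2]

lemma pvInner_fold (c : Nat) :
    ∀ (w : List Int) (i : Int), 0 ≤ i → i.toNat < w.length → (c : Int) ≤ i →
    (PySem.List.pyRange (i - (c : Int) + 1) (i + 1) 1).foldl
      (fun w j => PySem.List.pySetD w i (PySem.List.pyGetD w i 0 + PySem.List.pyGetD w (i - j) 0)) w
    = PySem.List.pySetD w i (PySem.List.pyGetD w i 0 + (w.take c).sum) := by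
  induction c with
  | zero =>
    intro w i h0 hlen hc
    rw [show (i - ((0:Nat) : Int) + 1) = i + 1 by omega, PySem.List.pyRange_one_eq_nil (by omega)]
    simp only [List.foldl_nil, PySem.List.pySetD_of_nonneg _ _ h0]
    rw [PySem.List.pyGetD_eq_getElem w 0 h0 (by omega)]
    simp only [List.take_zero, List.sum_nil, add_zero]
    exact (List.set_getElem_self (by omega)).symm
  | succ c ih =>
    intro w i h0 hlen hc
    have hci : (c : Int) < i := by push_cast at hc ⊢; omega
    have hclen : c < w.length := by omega
    rw [show i - ((c + 1 : Nat) : Int) + 1 = i - (c : Int) by push_cast; ring,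
        PySem.List.pyRange_one_cons (by omega)]
    simp only [List.foldl_cons]
    rw [show i - (i - (c : Int)) = ((c : Nat) : Int) by ring]
    set v := PySem.List.pyGetD w i 0 + PySem.List.pyGetD w ((c : Nat) : Int) 0 with hv
    rw [show i - (c:Int) + 1 = i - (c:Int) + 1 by rfl]
    have hlen' : i.toNat < (PySem.List.pySetD w i v).length := by
      rw [PySem.List.length_pySetD]; exact hlen
    rw [ih (PySem.List.pySetD w i v) i h0 hlen' (by omega)]
    -- now rewrite sets/gets
    rw [PySem.List.pySetD_of_nonneg _ _ h0, PySem.List.pySetD_of_nonneg _ _ h0,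
        PySem.List.pySetD_of_nonneg _ _ h0, List.set_set]
    congr 1
    have htake : (w.set i.toNat v).take c = w.take c := by
      exact List.take_set_of_le (by omega : c ≤ i.toNat)
    have hget : PySem.List.pyGetD (w.set i.toNat v) i 0 = v := by
      rw [PySem.List.pyGetD_eq_getElem _ _ h0 (by rw [List.length_set]; omega)]
      simp
    rw [htake, hget, hv]
    rw [PySem.List.pyGetD_natCast, List.sum_take_succ _ _ hclen]
    have : w.getD c 0 = w[c] := List.getD_eq_getElem w 0 hclen
    rw [this]; ring

lemma pvInit_fold (c N : Nat) (hc : c ≤ N + 1) :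
    (PySem.List.pyRange 1 (c : Int) 1).foldl (fun w i => PySem.List.pySetD w i 0)
      (List.replicate (N + 1) (1 : Int))
    = (List.range (N + 1)).map (fun t => if 1 ≤ t ∧ t < c then 0 else 1) := by
  induction c with
  | zero =>
    rw [PySem.List.pyRange_one_eq_nil (by omega)]
    apply List.ext_getElem
    · simp
    · intro t ht1 ht2
      simp only [List.foldl_nil, List.getElem_map, List.getElem_range, List.getElem_replicate]
      rw [if_neg (by omega)]
  | succ c ih =>
    by_cases h1 : c = 0
    · subst h1
      rw [PySem.List.pyRange_one_eq_nil (by omega)]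
      apply List.ext_getElem
      · simp
      · intro t ht1 ht2
        simp only [List.foldl_nil, List.getElem_map, List.getElem_range, List.getElem_replicate]
        rw [if_neg (by omega)]
    · have hc' : c ≤ N + 1 := by omega
      rw [show ((c + 1 : Nat) : Int) = (c : Int) + 1 by push_cast; ring,
          PySem.List.pyRange_one_succ_right (by omega), List.foldl_concat, ih hc']
      rw [PySem.List.pySetD_of_nonneg _ _ (by omega), show ((c:Int)).toNat = c by omega]
      apply List.ext_getElem
      · simp
      · intro t ht1 ht2
        simp only [List.length_set, List.length_map, List.length_range] at ht1
        rw [List.getElem_set]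
        by_cases he : t = c
        · subst he
          rw [if_pos rfl, List.getElem_map]
          simp only [List.getElem_range]
          rw [if_pos (by omega)]
        · rw [if_neg (by omega), List.getElem_map, List.getElem_map]
          simp only [List.getElem_range]
          split_ifs with hx hy
          · rfl
          · omega
          · omega
          · rfl

def pvInitL (N M : Nat) : List Int :=
  (List.range (N + 1)).map (fun t => if 1 ≤ t ∧ t < M then 0 else 1)

lemma pvInitL_len (N M : Nat) : (pvInitL N M).length = N + 1 := by simp [pvInitL]

lemma pvInitL_getElem (N M t : Nat) (h : t < N + 1) :
    (pvInitL N M)[t]'(by simp [pvInitL]; omega) = if 1 ≤ t ∧ t < M then 0 else 1 := by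
  simp only [pvInitL, List.getElem_map, List.getElem_range]

lemma pvOuter_fold (N M : Nat) :
    ∀ k, k ≤ N →
    (PySem.List.pyRange 1 ((k : Int) + 1) 1).foldl (fun w i =>
      let w2 := PySem.List.pySetD w i (PySem.List.pyGetD w i 0 + PySem.List.pyGetD w (i - 1) 0)
      (PySem.List.pyRange ((M : Int) + 1) (i + 1) 1).foldl
        (fun w j => PySem.List.pySetD w i (PySem.List.pyGetD w i 0 + PySem.List.pyGetD w (i - j) 0)) w2)
      (pvInitL N M)
    = (pvStepRows M k).1 ++ (pvInitL N M).drop (k + 1) := by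
  intro k
  induction k with
  | zero =>
    intro _
    rw [PySem.List.pyRange_one_eq_nil (by omega), List.foldl_nil]
    have h0 : (0 : Nat) < (pvInitL N M).length := by rw [pvInitL_len]; omega
    have := List.drop_eq_getElem_cons h0
    rw [List.drop_zero] at this
    rw [pvStepRows]
    conv_lhs => rw [this]
    rw [pvInitL_getElem N M 0 (by omega)]
    simp
  | succ k ih =>
    intro hk1
    have hk : k ≤ N := by omega
    have hP := pvStepRows_len M k
    have hIlen := pvInitL_len N M
    set P := (pvStepRows M k).1 with hPdef
    set I := pvInitL N M with hIdef
    rw [show ((k + 1 : Nat) : Int) + 1 = ((k : Int) + 1) + 1 by push_cast; ring,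
        PySem.List.pyRange_one_succ_right (by omega), List.foldl_concat, ih hk]
    dsimp only
    set w : List Int := P ++ I.drop (k + 1) with hwdef
    have hwlen : w.length = N + 1 := by
      rw [hwdef, List.length_append, hP, List.length_drop, hIlen]; omega
    have hi0 : (0 : Int) ≤ (k : Int) + 1 := by omega
    have hitn : ((k : Int) + 1).toNat = k + 1 := by omega
    -- the two reads in the first statement
    have hg1 : PySem.List.pyGetD w ((k : Int) + 1) 0 = if 1 ≤ k + 1 ∧ k + 1 < M then 0 else 1 := by
      rw [PySem.List.pyGetD_eq_getElem w 0 hi0 (by omega)]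
      simp only [hitn, hwdef]
      rw [List.getElem_append_right (by omega)]
      simp only [hP, List.getElem_drop, show k + 1 - (k + 1) = 0 by omega, Nat.add_zero, hIdef]
      rw [pvInitL_getElem N M (k + 1) (by omega)]
    have hg2 : PySem.List.pyGetD w ((k : Int) + 1 - 1) 0 = P.getD k 0 := by
      rw [show (k : Int) + 1 - 1 = ((k : Nat) : Int) by ring, PySem.List.pyGetD_natCast, hwdef]
      exact List.getD_append _ _ _ _ (by omega)
    rw [hg1, hg2]
    set v0 : Int := (if 1 ≤ k + 1 ∧ k + 1 < M then 0 else 1) + P.getD k 0 with hv0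
    rw [PySem.List.pySetD_of_nonneg _ _ hi0, hitn]
    set w2 : List Int := w.set (k + 1) v0 with hw2def
    have hw2len : w2.length = N + 1 := by rw [hw2def, List.length_set, hwlen]
    -- s' of the next step row
    have hs' := pvStepRows_snd M (k + 1)
    have hrow : (pvStepRows M (k + 1)).1
        = P ++ [(if M ≤ k + 1 then 1 else 0) + P.getD k 0 + (pvStepRows M (k + 1)).2] := by
      simp only [pvStepRows]
      rfl
    have hassemble : ∀ v : Int, w.set (k + 1) v = (P ++ [v]) ++ I.drop (k + 2) := by
      intro v
      rw [hwdef, List.set_append_right _ _ (by omega), hP, show k + 1 - (k + 1) = 0 by omega,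
          List.drop_eq_getElem_cons (by omega : k + 1 < I.length), List.set_cons_zero,
          ← List.append_cons]
    have hilen : ((k : Int) + 1).toNat < w2.length := by rw [hitn, hw2len]; omega
    by_cases hM : M ≤ k + 1
    · -- inner loop sums the first (k+1-M) entries
      have hstart : (M : Int) + 1 = ((k : Int) + 1) - ((k + 1 - M : Nat) : Int) + 1 := by
        omega
      rw [hstart, pvInner_fold (k + 1 - M) w2 ((k : Int) + 1) hi0 hilen (by omega)]
      have hgw2 : PySem.List.pyGetD w2 ((k : Int) + 1) 0 = v0 := by
        rw [PySem.List.pyGetD_eq_getElem w2 0 hi0 (by have := hw2len; omega)]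
        simp only [hitn, hw2def]
        exact List.getElem_set_self (by rw [List.length_set]; have := hwlen; omega)
      have htk : w2.take (k + 1 - M) = P.take (k + 1 - M) := by
        rw [hw2def, List.take_set_of_le (by omega), hwdef,
            List.take_append_of_le_length (by omega)]
      rw [hgw2, htk, PySem.List.pySetD_of_nonneg _ _ hi0, hitn, hw2def, List.set_set]
      have hval : v0 + (P.take (k + 1 - M)).sum
          = (if M ≤ k + 1 then 1 else 0) + P.getD k 0 + (pvStepRows M (k + 1)).2 := by
        rw [hs', hrow, List.take_append_of_le_length (by omega), hv0,
            if_neg (by omega : ¬ (1 ≤ k + 1 ∧ k + 1 < M)), if_pos hM]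
        try ring
      rw [hval, hassemble, ← hrow]
    · rw [PySem.List.pyRange_one_eq_nil (by omega), List.foldl_nil, hw2def,
          hassemble]
      have hs2 : (pvStepRows M (k + 1)).2 = 0 := by
        rw [hs', show k + 1 - M = 0 by omega, List.take_zero, List.sum_nil]
      rw [hrow, hs2, if_neg hM, hv0, if_pos (by omega : 1 ≤ k + 1 ∧ k + 1 < M)]
      simp

-- ===== VERDICT (by name: the statement is the Claim_ definition above) =====
theorem counting_block_combinations_spec : Claim_equal_counting_block_combinations := by
  intro n m _ hpre
  unfold Spec_counting_block_combinations
  unfold counting_block_combinations counting_block_combinations_alt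
  by_cases hn : n < 0
  · rw [if_pos hn, show (n + 1).toNat = 0 by omega,
        PySem.List.pyRange_one_eq_nil (by omega : n + 1 ≤ 1),
        PySem.List.pyRange_one_eq_nil (by omega : min m (n + 1) ≤ 1)]
    rfl
  · rw [if_neg hn]
    by_cases hm : 0 ≤ m
    · obtain ⟨N, rfl⟩ := Int.eq_ofNat_of_zero_le (by omega : 0 ≤ n)
      obtain ⟨M, rfl⟩ := Int.eq_ofNat_of_zero_le hm
      rw [pvB_fold M N]
      dsimp only
      rw [show (((N : Int)) + 1).toNat = N + 1 by omega,
          show min ((M : Int)) ((N : Int) + 1) = ((min M (N + 1) : Nat) : Int) by push_cast; omega,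
          pvInit_fold (min M (N + 1)) N (by omega)]
      have hmap : (List.range (N + 1)).map (fun t => if 1 ≤ t ∧ t < min M (N + 1) then (0:Int) else 1)
          = pvInitL N M := by
        unfold pvInitL
        apply List.map_congr_left
        intro t ht
        rw [List.mem_range] at ht
        by_cases hx : 1 ≤ t ∧ t < M
        · rw [if_pos ⟨hx.1, by omega⟩, if_pos hx]
        · rw [if_neg (by omega), if_neg hx]
      rw [hmap, pvOuter_fold N M N le_rfl,
          List.drop_eq_nil_of_le (by rw [pvInitL_len]), List.append_nil]
    · have hn0 : n = 0 := by
        rcases hpre with h | h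
        · exact absurd h hm
        · omega
      subst hn0
      rw [PySem.List.pyRange_one_eq_nil (by omega : (0:Int) + 1 ≤ 1),
          PySem.List.pyRange_one_eq_nil (by omega : min m ((0:Int) + 1) ≤ 1)]
      rfl
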